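-- pv_equiv track=rewrite | github.com/NovasPlace/agent-atlas | context_recall.py | _parse_session_state
-- ===== SOURCE A (Python) =====
-- def _parse_session_state(session_content: str) -> tuple[str, list[str]]:
--     """Extract current_work and critical_context from session.md."""
--     current_work = ""
--     critical: list[str] = []
--
--     section = ""
--     for line in session_content.splitlines():
--         stripped = line.strip()
--         if stripped.startswith("## Current Work"):
--             section = "work"
--             continue
--         if stripped.startswith("## Context That Must Not Be Lost"):
--             section = "critical"
--             continue
--         if stripped.startswith("## "):
--             section = ""
--             continue
--
--         if section == "work" and stripped and stripped != "_none_":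
--             current_work = stripped
--         if section == "critical" and stripped.startswith("- "):
--             critical.append(stripped[2:])
--
--     return current_work, critical[:5]
-- ===== SOURCE B (Python) =====
-- def _parse_session_state(session_content: str) -> tuple[str, list[str]]:
--     """Two-pass: group stripped lines by section, then post-process each group."""
--     work_lines: list[str] = []
--     critical_lines: list[str] = []
--
--     section = ""
--     for line in session_content.splitlines():
--         s = line.strip()
--         if s.startswith("## Current Work"):
--             section = "work"
--         elif s.startswith("## Context That Must Not Be Lost"):
--             section = "critical"
--         elif s.startswith("## "):
--             section = ""
--         elif section == "work":
--             work_lines.append(s)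
--         elif section == "critical":
--             critical_lines.append(s)
--
--     work = [s for s in work_lines if s and s != "_none_"]
--     current_work = work[-1] if work else ""
--     critical = [s[2:] for s in critical_lines if s.startswith("- ")]
--     return current_work, critical[:5]
-- ===== Notes on version B (the rewrite author's own statement) =====
-- stated objective: alternative
-- what changed: Replaces A's single loop that threads the answer state (last work line, growing critical list) with a two-pass decomposition: first group stripped lines under their active section header, then post-process the two groups (last qualifying work line; '- '-prefixed critical lines, capped at 5).
import Mathlib
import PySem

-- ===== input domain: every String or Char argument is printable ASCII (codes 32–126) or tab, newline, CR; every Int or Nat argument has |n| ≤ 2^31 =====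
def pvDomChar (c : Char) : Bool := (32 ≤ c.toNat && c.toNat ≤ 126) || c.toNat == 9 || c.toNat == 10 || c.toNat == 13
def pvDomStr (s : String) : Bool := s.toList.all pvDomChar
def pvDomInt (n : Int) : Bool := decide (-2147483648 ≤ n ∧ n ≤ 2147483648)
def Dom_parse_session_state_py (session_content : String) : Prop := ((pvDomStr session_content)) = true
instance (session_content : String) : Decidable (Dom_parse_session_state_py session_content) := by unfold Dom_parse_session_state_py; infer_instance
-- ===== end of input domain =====

-- B is an alternative decomposition: two passes (group lines by section, then post-process
-- the groups) instead of A's single state-threading loop; same O(n) cost, return value only.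

-- ===== PORT A =====
-- A's loop body, one step per line; state = (current_work, critical, section)
def pvStepA (st : String × List String × String) (line : String) : String × List String × String :=
  let stripped := PySem.Str.strip line
  if PySem.Str.startswith stripped "## Current Work" then (st.1, st.2.1, "work")
  else if PySem.Str.startswith stripped "## Context That Must Not Be Lost" then (st.1, st.2.1, "critical")
  else if PySem.Str.startswith stripped "## " then (st.1, st.2.1, "")
  else
    let cw := if st.2.2 == "work" && stripped != "" && stripped != "_none_" then stripped else st.1
    let crit := if st.2.2 == "critical" && PySem.Str.startswith stripped "- " then
        st.2.1 ++ [PySem.Str.slice stripped (some 2) none] else st.2.1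
    (cw, crit, st.2.2)

def parse_session_state_py (session_content : String) : String × List String :=
  let st := (PySem.Str.splitlines session_content).foldl pvStepA ("", [], "")
  (st.1, PySem.List.slice st.2.1 none (some 5))

-- ===== PORT B =====
-- B's grouping pass; state = (work_lines, critical_lines, section)
def pvStepB (st : List String × List String × String) (line : String) : List String × List String × String :=
  let s := PySem.Str.strip line
  if PySem.Str.startswith s "## Current Work" then (st.1, st.2.1, "work")
  else if PySem.Str.startswith s "## Context That Must Not Be Lost" then (st.1, st.2.1, "critical")
  else if PySem.Str.startswith s "## " then (st.1, st.2.1, "")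
  else if st.2.2 == "work" then (st.1 ++ [s], st.2.1, st.2.2)
  else if st.2.2 == "critical" then (st.1, st.2.1 ++ [s], st.2.2)
  else st

def parse_session_state_py_alt (session_content : String) : String × List String :=
  let g := (PySem.Str.splitlines session_content).foldl pvStepB ([], [], "")
  let work := g.1.filter (fun s => s != "" && s != "_none_")
  let current_work := work.getLastD ""
  let critical := (g.2.1.filter (fun s => PySem.Str.startswith s "- ")).map
      (fun s => PySem.Str.slice s (some 2) none)
  (current_work, PySem.List.slice critical none (some 5))

-- ===== PRECONDITION & SPEC =====
def Spec_parse_session_state_py (session_content : String) (out : String × List String) : Prop := out = parse_session_state_py_alt session_content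
instance (session_content : String) (out : String × List String) : Decidable (Spec_parse_session_state_py session_content out) := by unfold Spec_parse_session_state_py; infer_instance

-- ===== CLAIM (what is proved, stated in full; the proofs are below) =====
def Claim_equal_parse_session_state_py : Prop := ∀ (session_content : String), Dom_parse_session_state_py session_content → Spec_parse_session_state_py session_content (parse_session_state_py session_content)

-- ===== LEMMAS AND PROOFS =====

-- one step of B on an arbitrary accumulator only appends to the accumulator lists
theorem pvStepB_shift (w c : List String) (sec line : String) :
    pvStepB (w, c, sec) line =
      (w ++ (pvStepB ([], [], sec) line).1,
       c ++ (pvStepB ([], [], sec) line).2.1,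
       (pvStepB ([], [], sec) line).2.2) := by
  unfold pvStepB
  dsimp only
  split_ifs <;> simp

-- B's whole grouping pass only appends to the accumulator lists
theorem pvFoldB_shift (lines : List String) : ∀ (w c : List String) (sec : String),
    lines.foldl pvStepB (w, c, sec) =
      (w ++ (lines.foldl pvStepB ([], [], sec)).1,
       c ++ (lines.foldl pvStepB ([], [], sec)).2.1,
       (lines.foldl pvStepB ([], [], sec)).2.2) := by
  induction lines with
  | nil => intro w c sec; simp
  | cons l ls ih =>
    intro w c sec
    simp only [List.foldl_cons]
    rw [pvStepB_shift]
    rcases h : pvStepB ([], [], sec) l with ⟨X, Y, sec'⟩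
    rw [ih (w ++ X) (c ++ Y) sec', ih X Y sec']
    simp

-- the invariant: A's loop result expressed through B's grouping pass
theorem pvMain (lines : List String) : ∀ (cw : String) (crit : List String) (sec : String),
    lines.foldl pvStepA (cw, crit, sec) =
      ((((lines.foldl pvStepB ([], [], sec)).1.filter (fun s => s != "" && s != "_none_")).getLastD cw),
       crit ++ (((lines.foldl pvStepB ([], [], sec)).2.1.filter (fun s => PySem.Str.startswith s "- ")).map
         (fun s => PySem.Str.slice s (some 2) none)),
       (lines.foldl pvStepB ([], [], sec)).2.2) := by
  induction lines with
  | nil => intro cw crit sec; simp [List.getLastD]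
  | cons l ls ih =>
    intro cw crit sec
    simp only [List.foldl_cons]
    by_cases h1 : PySem.Str.startswith (PySem.Str.strip l) "## Current Work"
    · simp only [pvStepA, pvStepB, h1, if_true]
      exact ih cw crit "work"
    · by_cases h2 : PySem.Str.startswith (PySem.Str.strip l) "## Context That Must Not Be Lost"
      · simp only [pvStepA, pvStepB, h1, h2, if_true]
        exact ih cw crit "critical"
      · by_cases h3 : PySem.Str.startswith (PySem.Str.strip l) "## "
        · simp only [pvStepA, pvStepB, h1, h2, h3, if_true]
          exact ih cw crit ""
        · by_cases hw : sec == "work"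
          · have hc : (sec == "critical") = false := by
              simp only [beq_iff_eq] at hw; subst hw; decide
            simp only [pvStepA, pvStepB, h1, h2, h3, hw, hc, Bool.true_and, Bool.false_and,
              Bool.false_eq_true, if_false, if_true, List.nil_append]
            rw [pvFoldB_shift ls [PySem.Str.strip l] [] sec, ih]
            by_cases hp : (PySem.Str.strip l != "" && PySem.Str.strip l != "_none_") = true
            · simp only [hp, if_true, List.filter_cons, List.singleton_append,
                List.getLastD_cons, List.nil_append]
            · simp only [Bool.not_eq_true] at hp
              simp only [hp, Bool.false_eq_true, if_false, List.filter_cons,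
                List.singleton_append, List.nil_append]
          · by_cases hc : sec == "critical"
            · simp only [pvStepA, pvStepB, h1, h2, h3, hw, hc, Bool.true_and, Bool.false_and,
                Bool.false_eq_true, if_false, if_true, List.nil_append]
              rw [pvFoldB_shift ls [] [PySem.Str.strip l] sec, ih]
              by_cases hq : PySem.Str.startswith (PySem.Str.strip l) "- " = true
              · simp only [hq, if_true, List.filter_cons, List.singleton_append,
                  List.map_cons, List.append_assoc, List.cons_append, List.nil_append]
              · simp only [Bool.not_eq_true] at hq
                simp only [hq, Bool.false_eq_true, if_false, List.filter_cons,
                  List.singleton_append, List.nil_append]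
            · simp only [Bool.not_eq_true] at hw hc
              simp only [pvStepA, pvStepB, h1, h2, h3, hw, hc, Bool.false_and,
                Bool.false_eq_true, if_false]
              exact ih cw crit sec

-- ===== VERDICT (by name: the statement is the Claim_ definition above) =====
theorem parse_session_state_py_spec : Claim_equal_parse_session_state_py := by
  intro s _
  unfold Spec_parse_session_state_py parse_session_state_py parse_session_state_py_alt
  rw [pvMain]
  simp
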